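-- pv_equiv track=rewrite | github.com/heyashy/horcrux | horcrux/corpus/characters.py | claim_single_word_clusters
-- ===== SOURCE A (Python) =====
-- from collections import Counter, defaultdict
--
-- _GENERIC_TITLES = frozenset({
--     "mr.", "mr", "mrs.", "mrs", "miss", "ms.", "ms", "master",
--     "lord", "lady", "sir", "madam", "madame",
--     "aunt", "uncle", "auntie",
--     "professor", "prof.", "prof", "dr.", "dr", "doctor",
--     "the", "a", "an",
--     "father", "mother", "dad", "mom", "mum", "daddy", "mommy", "mummy",
--     "boy", "girl", "man", "woman", "kid", "child",
-- })
--
-- def _significant_tokens(name: str) -> set[str]: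
--     """Lowercased tokens with generic titles + articles stripped.
--
--     `Mr. Filch`         → {'filch'}
--     `Aunt Petunia`      → {'petunia'}
--     `the boy`           → {} (all generic)
--     `Albus Dumbledore`  → {'albus', 'dumbledore'}
--     """
--     return {t for t in name.lower().split() if t not in _GENERIC_TITLES}
--
-- def claim_single_word_clusters(
--     clusters: dict[str, list[str]],
-- ) -> dict[str, list[str]]:
--     """Merge single-word clusters into multi-word clusters that *uniquely*
--     own them as a significant token.
--
--     Rule:
--       A single-word cluster `S` merges into a multi-word cluster `M` iff
--       both of:
--         - `S`'s canonical contains exactly one significant (non-generic)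
--           token `t`
--         - exactly one multi-word cluster's canonical contains `t` as one
--           of its significant tokens
--
--     The "exactly one" gate is what distinguishes a personal name (only
--     one multi-word cluster owns it — `Hermione` → `Hermione Granger`)
--     from a family/group name (multiple multi-word clusters share it —
--     `Weasley` is part of `Ron Weasley`, `Fred Weasley`, ... ; ambiguous,
--     don't merge).
--
--     Canonical preference: when merging, the multi-word form wins. Yields
--     human-readable cluster names in reports (`Harry Potter`, not `Harry`)
--     even though the single-word has higher frequency. Aliases from the
--     single-word cluster are appended.
--
--     Pure function; doesn't mutate input. Order of execution within a
--     single discovery run doesn't matter — uses the original cluster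
--     membership snapshot, not a live-mutating one.
--     """
--     # Index: significant_token → list of multi-word CANONICALS containing it.
--     # Only ≤ 2-significant-token canonicals are indexed as "owners".
--     # Three-or-more-significant-token forms are full-name expansions
--     # ("Harry James Potter", "Albus Wulfric Brian Dumbledore"), not
--     # personal-name anchors. Including them as owners blocks shorter
--     # forms from folding (e.g. "Harry" sees two owners — "Harry Potter"
--     # and "Harry James Potter" — and refuses to fold even though
--     # "Harry Potter" is the obvious anchor). Same principle as Finding 9
--     # at Tier 1a; applied here at Tier 1c.
--     multiword_owners: dict[str, list[str]] = defaultdict(list)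
--     for canonical in clusters:
--         if len(canonical.split()) > 1:
--             sig_tokens = _significant_tokens(canonical)
--             if len(sig_tokens) > 2:
--                 continue
--             for token in sig_tokens:
--                 multiword_owners[token].append(canonical)
--
--     new_clusters = {k: list(v) for k, v in clusters.items()}
--
--     for canonical in list(clusters.keys()):
--         if len(canonical.split()) != 1:
--             continue
--         sig_tokens = _significant_tokens(canonical)
--         if len(sig_tokens) != 1:
--             continue
--         token = next(iter(sig_tokens))
--         owners = multiword_owners.get(token, [])
--         if len(owners) != 1:
--             continue
--
--         target = owners[0]
--         if target not in new_clusters or canonical not in new_clusters: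
--             continue
--
--         for alias in new_clusters[canonical]:
--             if alias not in new_clusters[target]:
--                 new_clusters[target].append(alias)
--         del new_clusters[canonical]
--
--     return new_clusters
-- ===== SOURCE B (Python) =====
-- _GENERIC_TITLES = frozenset({
--     "mr.", "mr", "mrs.", "mrs", "miss", "ms.", "ms", "master",
--     "lord", "lady", "sir", "madam", "madame",
--     "aunt", "uncle", "auntie",
--     "professor", "prof.", "prof", "dr.", "dr", "doctor",
--     "the", "a", "an",
--     "father", "mother", "dad", "mom", "mum", "daddy", "mommy", "mummy",
--     "boy", "girl", "man", "woman", "kid", "child",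
-- })
--
-- def _significant_tokens(name):
--     return {t for t in name.lower().split() if t not in _GENERIC_TITLES}
--
-- def claim_single_word_clusters(clusters):
--     # Purely functional rebuild: no working copy, no deletion.  Each cluster's
--     # fate is independent (owners come from the original snapshot), so we map
--     # every significant token to its sole multi-word anchor (None if shared),
--     # resolve each key's owner once, group the merging single-word clusters
--     # under their target, and emit the result dict directly in key order.
--     keys = list(clusters)
--
--     # token -> its unique multi-word anchor, or None once a second anchor claims it
--     unique = {}
--     for c in keys:
--         if len(c.split()) > 1:
--             sig = _significant_tokens(c)
--             if len(sig) <= 2: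
--                 for t in sig:
--                     unique[t] = c if t not in unique else None
--
--     def _owner_of(s):
--         if len(s.split()) != 1:
--             return None
--         sig = _significant_tokens(s)
--         if len(sig) != 1:
--             return None
--         (t,) = sig
--         return unique.get(t)
--
--     owner = {k: _owner_of(k) for k in keys}
--
--     # target -> the single-word keys folding into it, in key order
--     groups = {}
--     for s in keys:
--         if owner[s] is not None:
--             groups.setdefault(owner[s], []).append(s)
--
--     result = {}
--     for k in keys:
--         if owner[k] is not None:
--             continue
--         merged = list(clusters[k])
--         for s in groups.get(k, []):
--             for a in clusters[s]:
--                 if a not in merged: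
--                     merged.append(a)
--         result[k] = merged
--     return result
-- ===== Notes on version B (the rewrite author's own statement) =====
-- stated objective: alternative
-- what changed: B replaces A's copy-then-mutate-and-delete pipeline with a pure rebuild: it maps each significant token to its sole multi-word anchor (collapsing shared tokens to None as it goes), resolves every key's owner once, groups the merging single-word clusters under their target, and emits the result dict directly in key order with each surviving key's extended alias list (correct because A's merges are independent: owners come from the original snapshot and targets, being multi-word, are never deleted).
import Mathlib
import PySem

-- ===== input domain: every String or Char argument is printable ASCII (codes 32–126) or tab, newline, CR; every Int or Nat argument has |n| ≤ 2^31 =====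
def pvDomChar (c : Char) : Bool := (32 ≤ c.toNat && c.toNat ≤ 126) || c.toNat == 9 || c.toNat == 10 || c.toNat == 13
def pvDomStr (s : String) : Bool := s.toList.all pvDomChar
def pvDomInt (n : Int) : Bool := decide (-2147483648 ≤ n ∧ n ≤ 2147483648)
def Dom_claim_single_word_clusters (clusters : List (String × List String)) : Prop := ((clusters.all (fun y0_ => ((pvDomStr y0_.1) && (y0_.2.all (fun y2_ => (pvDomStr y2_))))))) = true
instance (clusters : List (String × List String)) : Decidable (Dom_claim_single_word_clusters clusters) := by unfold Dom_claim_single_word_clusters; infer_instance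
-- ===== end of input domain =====

-- B is a purely functional rewrite (objective: alternative): instead of A's index-build /
-- copy / mutate-and-delete loop, B computes each key's unique owner with a predicate and
-- builds the result dict directly, grouping the merged aliases under each surviving key.

-- shared module context (_GENERIC_TITLES and _significant_tokens are used by both Pythons)
def pvGenericTitles : List String := ["mr.", "mr", "mrs.", "mrs", "miss", "ms.", "ms", "master",
  "lord", "lady", "sir", "madam", "madame", "aunt", "uncle", "auntie",
  "professor", "prof.", "prof", "dr.", "dr", "doctor", "the", "a", "an",
  "father", "mother", "dad", "mom", "mum", "daddy", "mommy", "mummy",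
  "boy", "girl", "man", "woman", "kid", "child"]

-- _significant_tokens: {t for t in name.lower().split() if t not in _GENERIC_TITLES}
def pvSigTokens (name : String) : PySem.Set String :=
  PySem.Set.ofList ((PySem.Str.split₀ (PySem.Str.lower name)).filter (fun t => !pvGenericTitles.contains t))

-- ===== PORT A =====
def claim_single_word_clusters (clusters : List (String × List String)) : List (String × List String) :=
  let d : PySem.Dict String (List String) := PySem.Dict.ofList clusters
  -- multiword_owners: defaultdict(list), filled by the first pass
  let owners : PySem.Dict String (List String) :=
    d.keys.foldl (fun ow canonical =>
      if (PySem.Str.split₀ canonical).length > 1 then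
        let sig_tokens := pvSigTokens canonical
        if sig_tokens.length > 2 then ow
        else sig_tokens.foldl (fun ow token => ow.modify token [] (· ++ [canonical])) ow
      else ow) PySem.Dict.empty
  -- new_clusters = {k: list(v) for k, v in clusters.items()}
  let nc : PySem.Dict String (List String) :=
    d.keys.foldl (fun nc canonical =>
      if (PySem.Str.split₀ canonical).length ≠ 1 then nc
      else
        let sig_tokens := pvSigTokens canonical
        if sig_tokens.length ≠ 1 then nc
        else
          let token := sig_tokens.headD ""      -- next(iter(sig_tokens)): the single element
          let ownersL := owners.getD token []   -- multiword_owners.get(token, [])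
          if ownersL.length ≠ 1 then nc
          else
            let target := ownersL.headD ""      -- owners[0]
            if !(nc.contains target) || !(nc.contains canonical) then nc
            else
              let nc' := (nc.getD canonical []).foldl (fun nc al =>
                  let tl := nc.getD target []
                  if tl.contains al then nc else nc.insert target (tl ++ [al])) nc
              nc'.erase canonical) d
  nc.items

-- ===== PORT B =====
-- _owner_of(s) (closure over `unique`): the sole multi-word anchor s folds into, or None
def pvOwnerOfU (unique : PySem.Dict String (Option String)) (s : String) : Option String :=
  if (PySem.Str.split₀ s).length ≠ 1 then none
  else
    let sig := pvSigTokens s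
    if sig.length ≠ 1 then none
    else unique.getD (sig.headD "") none         -- (t,) = sig; unique.get(t)

def claim_single_word_clusters_alt (clusters : List (String × List String)) : List (String × List String) :=
  let d : PySem.Dict String (List String) := PySem.Dict.ofList clusters
  let keys := d.keys
  -- unique: significant token -> its sole multi-word anchor, None once a second anchor claims it
  let unique : PySem.Dict String (Option String) :=
    keys.foldl (fun u c =>
      if (PySem.Str.split₀ c).length > 1 then
        let sig := pvSigTokens c
        if sig.length ≤ 2 then
          sig.foldl (fun u t => u.insert t (if u.contains t then none else some c)) u
        else u
      else u) PySem.Dict.empty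
  -- owner = {k: _owner_of(k) for k in keys}
  let owner : PySem.Dict String (Option String) :=
    keys.foldl (fun ownr k => ownr.insert k (pvOwnerOfU unique k)) PySem.Dict.empty
  -- groups: target -> the single-word keys folding into it, in key order
  let groups : PySem.Dict String (List String) :=
    keys.foldl (fun g s =>
      match owner.getD s none with               -- owner[s] (every s is a key of owner)
      | some t => g.modify t [] (· ++ [s])       -- groups.setdefault(t, []).append(s)
      | none => g) PySem.Dict.empty
  let result : PySem.Dict String (List String) :=
    keys.foldl (fun result k =>
      if (owner.getD k none).isSome then result
      else
        let merged := (groups.getD k []).foldl (fun merged s =>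
            (d.getD s []).foldl (fun m a => if m.contains a then m else m ++ [a]) merged) (d.getD k [])
        result.insert k merged) PySem.Dict.empty
  result.items

-- ===== PRECONDITION & SPEC =====
def Spec_claim_single_word_clusters (clusters : List (String × List String)) (out : List (String × List String)) : Prop := out = claim_single_word_clusters_alt clusters
instance (clusters : List (String × List String)) (out : List (String × List String)) : Decidable (Spec_claim_single_word_clusters clusters out) := by unfold Spec_claim_single_word_clusters; infer_instance

-- ===== CLAIM (what is proved, stated in full; the proofs are below) =====
def Claim_equal_claim_single_word_clusters : Prop := ∀ (clusters : List (String × List String)), Dom_claim_single_word_clusters clusters → Spec_claim_single_word_clusters clusters (claim_single_word_clusters clusters)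

-- ===== LEMMAS AND PROOFS =====

-- _owns(canonical, token): the by-scan owner predicate the proofs pivot on
def pvOwns (canonical token : String) : Bool :=
  if (PySem.Str.split₀ canonical).length ≤ 1 then false
  else
    let sig := pvSigTokens canonical
    sig.length ≤ 2 && sig.contains token

-- the unique multi-word owner s folds into (by-scan characterisation)
def pvOwnerOf (keys : List String) (s : String) : Option String :=
  if (PySem.Str.split₀ s).length ≠ 1 then none
  else
    let sig := pvSigTokens s
    if sig.length ≠ 1 then none
    else
      let t := sig.headD ""
      let owners := keys.filter (fun c => pvOwns c t)
      if owners.length = 1 then some (owners.headD "") else none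


-- append the not-yet-present aliases (the inner dedup loop of both programs)
def pvDedupExt (m : List String) (as_ : List String) : List String :=
  as_.foldl (fun m a => if m.contains a then m else m ++ [a]) m

-- one canonical's contribution to owners[t]: appended once iff t is among its (distinct) tokens
theorem pv_inner_fold (toks : List String) (hnd : toks.Nodup) (ow : PySem.Dict String (List String))
    (c t : String) :
    (toks.foldl (fun ow token => ow.modify token [] (· ++ [c])) ow).getD t []
      = ow.getD t [] ++ (if t ∈ toks then [c] else []) := by
  induction toks generalizing ow with
  | nil => simp
  | cons x xs ih =>
    simp only [List.foldl_cons]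
    rw [ih (by simpa using hnd.of_cons)]
    rw [PySem.Dict.getD_modify]
    by_cases hx : t = x
    · subst hx
      have : t ∉ xs := by simpa using (List.nodup_cons.mp hnd).1
      simp [this]
    · simp [hx]

-- A's index lookup owners.getD t [] IS the scan of the keys B's predicate performs
theorem pv_index_eq_scan (keys : List String) (ow : PySem.Dict String (List String)) (t : String) :
    (keys.foldl (fun ow canonical =>
      if (PySem.Str.split₀ canonical).length > 1 then
        let sig_tokens := pvSigTokens canonical
        if sig_tokens.length > 2 then ow
        else sig_tokens.foldl (fun ow token => ow.modify token [] (· ++ [canonical])) ow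
      else ow) ow).getD t []
    = ow.getD t [] ++ keys.filter (fun c => pvOwns c t) := by
  induction keys generalizing ow with
  | nil => simp
  | cons c cs ih =>
    simp only [List.foldl_cons, List.filter_cons]
    rw [ih]
    by_cases h1 : (PySem.Str.split₀ c).length > 1
    · by_cases h2 : (pvSigTokens c).length > 2
      · have : pvOwns c t = false := by
          simp only [pvOwns]; rw [if_neg (by omega)]
          simp only [Bool.and_eq_false_iff, decide_eq_false_iff_not]
          left; omega
        simp only [if_pos h1, if_pos h2, this, Bool.false_eq_true, if_false]
      · have hnd : (pvSigTokens c).Nodup := by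
          unfold pvSigTokens; exact PySem.Set.nodup_ofList _
        rw [if_pos h1, if_neg h2, pv_inner_fold (pvSigTokens c) hnd ow c t]
        by_cases hm : t ∈ pvSigTokens c
        · have : pvOwns c t = true := by
            simp only [pvOwns]; rw [if_neg (by omega)]
            simp only [Bool.and_eq_true, decide_eq_true_eq]
            exact ⟨by omega, by simpa using hm⟩
          simp [hm, this, List.append_assoc]
        · have : pvOwns c t = false := by
            simp only [pvOwns]; rw [if_neg (by omega)]
            simp only [Bool.and_eq_false_iff]
            right; simpa [List.contains_iff_mem] using hm
          simp [hm, this]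
    · have : pvOwns c t = false := by
        simp only [pvOwns]; rw [if_pos (by omega)]
      simp only [if_neg h1, this, Bool.false_eq_true, if_false]

theorem pv_ownerOf_some (keys : List String) (s t : String) (h : pvOwnerOf keys s = some t) :
    t ∈ keys ∧ 1 < (PySem.Str.split₀ t).length ∧ (PySem.Str.split₀ s).length = 1 := by
  by_cases h1 : (PySem.Str.split₀ s).length ≠ 1
  · simp [pvOwnerOf, h1] at h
  · by_cases h2 : (pvSigTokens s).length ≠ 1
    · simp [pvOwnerOf, h1, h2] at h
    · by_cases h3 : (keys.filter (fun c => pvOwns c ((pvSigTokens s).headD ""))).length = 1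
      · simp only [pvOwnerOf] at h
        rw [if_neg h1, if_neg h2, if_pos h3] at h
        have h' : (keys.filter (fun c => pvOwns c ((pvSigTokens s).headD ""))).headD "" = t :=
          Option.some.inj h
        obtain ⟨x, hx⟩ := List.length_eq_one_iff.mp h3
        rw [hx] at h'; simp at h'
        have hmem : t ∈ keys.filter (fun c => pvOwns c ((pvSigTokens s).headD "")) := by
          rw [hx, h']; simp
        have hm := List.mem_filter.mp hmem
        refine ⟨hm.1, ?_, by omega⟩
        have ho := hm.2
        unfold pvOwns at ho
        split at ho
        · simp at ho
        · rename_i hg; omega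
      · simp [pvOwnerOf, h1, h2] at h
        exact absurd h.1 (by simpa using h3)

theorem pv_insert_self (nc : PySem.Dict String (List String)) (k : String) (v : List String)
    (h : (k, v) ∈ nc.items) (hnd : nc.keys.Nodup) : nc.insert k v = nc := by
  apply PySem.Dict.ext
  have hc : nc.contains k = true := by
    rw [PySem.Dict.contains_iff_mem_keys]
    exact PySem.Dict.mem_keys_of_mem_items _ h
  rw [PySem.Dict.items_insert_of_contains _ _ hc]
  have hget := PySem.Dict.get?_of_mem_items _ h hnd
  conv_rhs => rw [← List.map_id nc.items]
  apply List.map_congr_left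
  intro p hp
  by_cases he : p.1 = k
  · have hp2 : nc.get? p.1 = some p.2 := PySem.Dict.get?_of_mem_items _ (by simpa using hp) hnd
    rw [he, hget] at hp2
    simp only [he, beq_self_eq_true, if_pos, id]
    simp at hp2
    rw [hp2, ← he]
  · simp [he]

theorem pv_alias_fold (aliases : List String) (nc : PySem.Dict String (List String))
    (target : String) (m : List String) (hget : nc.get? target = some m) (hnd : nc.keys.Nodup) :
    (aliases.foldl (fun nc al =>
        let tl := nc.getD target []
        if tl.contains al then nc else nc.insert target (tl ++ [al])) nc)
      = nc.insert target (pvDedupExt m aliases) := by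
  induction aliases generalizing nc m with
  | nil =>
    simp only [List.foldl_nil, pvDedupExt, List.foldl_nil]
    exact (pv_insert_self nc target m (PySem.Dict.mem_items_of_get?_eq_some _ hget) hnd).symm
  | cons a as ih =>
    have htl : nc.getD target [] = m := PySem.Dict.getD_of_get?_eq_some _ _ hget
    simp only [List.foldl_cons, htl]
    by_cases hca : m.contains a
    · have hmem : a ∈ m := by simpa using hca
      rw [if_pos hca, ih nc m hget hnd]
      simp [pvDedupExt, hmem]
    · rw [if_neg (by simpa using hca)]
      rw [ih (nc.insert target (m ++ [a])) (m ++ [a]) (PySem.Dict.get?_insert_self _ _ _)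
            (PySem.Dict.nodup_keys_insert _ _ _ hnd)]
      rw [PySem.Dict.insert_insert_self]
      have hmem : a ∉ m := by simpa using hca
      simp [pvDedupExt, hmem]

theorem pv_b_fold (ks : List String) (r0 : PySem.Dict String (List String))
    (c : String → Bool) (v : String → List String)
    (hnd : ks.Nodup) (fresh : ∀ k ∈ ks, r0.contains k = false) :
    (ks.foldl (fun r k => if c k then r else r.insert k (v k)) r0).items
      = r0.items ++ (ks.filter (fun k => !c k)).map (fun k => (k, v k)) := by
  induction ks generalizing r0 with
  | nil => simp
  | cons k ks ih =>
    simp only [List.foldl_cons, List.filter_cons]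
    by_cases hc : c k
    · rw [if_pos hc, ih r0 (hnd.of_cons) (fun j hj => fresh j (List.mem_cons_of_mem _ hj))]
      simp [hc]
    · rw [if_neg hc, ih (r0.insert k (v k)) hnd.of_cons ?_]
      · rw [PySem.Dict.items_insert_of_not_contains _ _ (fresh k (List.mem_cons_self ..))]
        simp [hc, List.append_assoc]
      · intro j hj
        rw [PySem.Dict.contains_insert]
        have : j ≠ k := fun he => (List.nodup_cons.mp hnd).1 (he ▸ hj)
        simp [this, fresh j (List.mem_cons_of_mem _ hj)]

def pvVal (d : PySem.Dict String (List String)) (keys P : List String) (j : String) : List String :=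
  (P.filter (fun s => pvOwnerOf keys s == some j)).foldl
    (fun m s => pvDedupExt m (d.getD s [])) (d.getD j [])

def pvAlive (keys P : List String) (j : String) : Bool :=
  !((pvOwnerOf keys j).isSome && P.contains j)

theorem pv_items_erase (d : PySem.Dict String (List String)) (k : String) :
    (d.erase k).items = d.items.filter (fun p => !(p.1 == k)) := rfl

-- snoc a non-merging key: nothing changes
theorem pv_alive_snoc_none (keys P : List String) (k : String)
    (hk : pvOwnerOf keys k = none) :
    pvAlive keys (P ++ [k]) = pvAlive keys P := by
  funext j
  by_cases hj : j = k
  · subst hj; simp [pvAlive, hk]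
  · simp [pvAlive, hj]

theorem pv_val_snoc_none (d : PySem.Dict String (List String)) (keys P : List String) (k : String)
    (hk : pvOwnerOf keys k = none) :
    pvVal d keys (P ++ [k]) = pvVal d keys P := by
  funext j
  simp [pvVal, List.filter_append, hk]

theorem pv_step (d ow : PySem.Dict String (List String))
    (hnd : d.keys.Nodup)
    (hOW : ∀ t, ow.getD t [] = d.keys.filter (fun c => pvOwns c t))
    (P : List String) (k : String) (nc : PySem.Dict String (List String))
    (hkmem : k ∈ d.keys) (hkP : k ∉ P)
    (hitems : nc.items = (d.keys.filter (pvAlive d.keys P)).map (fun j => (j, pvVal d d.keys P j))) :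
    (if (PySem.Str.split₀ k).length ≠ 1 then nc
      else
        let sig_tokens := pvSigTokens k
        if sig_tokens.length ≠ 1 then nc
        else
          let token := sig_tokens.headD ""
          let ownersL := ow.getD token []
          if ownersL.length ≠ 1 then nc
          else
            let target := ownersL.headD ""
            if !(nc.contains target) || !(nc.contains k) then nc
            else
              ((nc.getD k []).foldl (fun nc al =>
                  let tl := nc.getD target []
                  if tl.contains al then nc else nc.insert target (tl ++ [al])) nc).erase k).items
      = (d.keys.filter (pvAlive d.keys (P ++ [k]))).map (fun j => (j, pvVal d d.keys (P ++ [k]) j)) := by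
  have hkeysnc : nc.keys = d.keys.filter (pvAlive d.keys P) := by
    have hk0 : nc.keys = nc.items.map (·.1) := rfl
    rw [hk0, hitems, List.map_map]
    simp [Function.comp_def]
  have hndnc : nc.keys.Nodup := by rw [hkeysnc]; exact hnd.filter _
  by_cases h1 : (PySem.Str.split₀ k).length ≠ 1
  · have hk : pvOwnerOf d.keys k = none := by simp [pvOwnerOf, h1]
    rw [if_pos h1, hitems]
    rw [pv_alive_snoc_none d.keys P k hk, pv_val_snoc_none d d.keys P k hk]
  · by_cases h2 : (pvSigTokens k).length ≠ 1
    · have hk : pvOwnerOf d.keys k = none := by simp [pvOwnerOf, h1, h2]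
      rw [if_neg h1]
      simp only [if_pos h2]
      rw [hitems]
      rw [pv_alive_snoc_none d.keys P k hk, pv_val_snoc_none d d.keys P k hk]
    · by_cases h3 : (ow.getD ((pvSigTokens k).headD "") []).length ≠ 1
      · have h3' : ¬(d.keys.filter (fun c => pvOwns c ((pvSigTokens k).head?.getD ""))).length = 1 := by
          have := h3; rw [hOW] at this
          simpa [List.headD_eq_head?_getD] using this
        have hk : pvOwnerOf d.keys k = none := by
          simp [pvOwnerOf, h1, h2, h3']
        rw [if_neg h1]
        simp only [if_neg h2, if_pos h3]
        rw [hitems]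
        rw [pv_alive_snoc_none d.keys P k hk, pv_val_snoc_none d d.keys P k hk]
      · -- merge case
        rw [if_neg h1]
        simp only [if_neg h2, if_neg h3]
        simp only [hOW]
        have h3'' : (d.keys.filter (fun c => pvOwns c ((pvSigTokens k).headD ""))).length = 1 := by
          have := h3; rw [hOW] at this; simpa using this
        have howner : pvOwnerOf d.keys k = some ((d.keys.filter (fun c => pvOwns c ((pvSigTokens k).headD ""))).headD "") := by
          simp only [pvOwnerOf]
          rw [if_neg h1, if_neg h2, if_pos h3'']
        obtain ⟨htmem, htlen, hk1⟩ := pv_ownerOf_some d.keys k _ howner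
        generalize htgt : (d.keys.filter (fun c => pvOwns c ((pvSigTokens k).headD ""))).headD "" = target at howner htmem htlen ⊢
        have hotarget : pvOwnerOf d.keys target = none := by
          have hne : (PySem.Str.split₀ target).length ≠ 1 := by omega
          simp [pvOwnerOf, hne]
        have haliveT : pvAlive d.keys P target = true := by simp [pvAlive, hotarget]
        have haliveK : pvAlive d.keys P k = true := by
          simp [pvAlive, howner]
          intro h; exact absurd h hkP
        have hmemT : (target, pvVal d d.keys P target) ∈ nc.items := by
          rw [hitems]
          exact List.mem_map_of_mem (List.mem_filter.mpr ⟨htmem, haliveT⟩)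
        have hmemK : (k, pvVal d d.keys P k) ∈ nc.items := by
          rw [hitems]
          exact List.mem_map_of_mem (List.mem_filter.mpr ⟨hkmem, haliveK⟩)
        have hcT : nc.contains target = true := by
          rw [PySem.Dict.contains_iff_mem_keys]; exact PySem.Dict.mem_keys_of_mem_items _ hmemT
        have hcK : nc.contains k = true := by
          rw [PySem.Dict.contains_iff_mem_keys]; exact PySem.Dict.mem_keys_of_mem_items _ hmemK
        rw [if_neg (by simp [hcT, hcK])]
        have hgetT : nc.get? target = some (pvVal d d.keys P target) :=
          PySem.Dict.get?_of_mem_items _ hmemT hndnc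
        have hvalK : pvVal d d.keys P k = d.getD k [] := by
          have hnil : P.filter (fun s => pvOwnerOf d.keys s == some k) = [] := by
            rw [List.filter_eq_nil_iff]
            intro s _ hs
            have hs' : pvOwnerOf d.keys s = some k := by simpa using hs
            obtain ⟨_, hlen, _⟩ := pv_ownerOf_some d.keys s k hs'
            omega
          simp [pvVal, hnil]
        have hgK : nc.getD k [] = d.getD k [] := by
          rw [PySem.Dict.getD_of_get?_eq_some _ _ (PySem.Dict.get?_of_mem_items _ hmemK hndnc), hvalK]
        rw [hgK, pv_alias_fold _ _ _ _ hgetT hndnc, pv_items_erase,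
            PySem.Dict.items_insert_of_contains _ _ hcT, hitems]
        have hWt : pvVal d d.keys (P ++ [k]) target
            = pvDedupExt (pvVal d d.keys P target) (d.getD k []) := by
          simp [pvVal, List.filter_append, howner, List.foldl_append, pvDedupExt]
        have hWj : ∀ j, j ≠ target → pvVal d d.keys (P ++ [k]) j = pvVal d d.keys P j := by
          intro j hj
          have hne : (pvOwnerOf d.keys k == some j) = false := by
            simp [howner, Ne.symm hj]
          simp [pvVal, List.filter_append, hne]
        rw [List.map_map, List.filter_map, List.filter_filter]
        have hkT : k ≠ target := by intro he; rw [he] at hk1; omega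
        have hfeq : ∀ j ∈ d.keys,
            (((fun p => !p.1 == k) ∘
                (fun p => if (p.1 == target) = true then (target, pvDedupExt (pvVal d d.keys P target) (d.getD k [])) else p) ∘
                  (fun j => (j, pvVal d d.keys P j))) j &&
              pvAlive d.keys P j)
              = pvAlive d.keys (P ++ [k]) j := by
          intro j _
          by_cases hj : j = target
          · subst hj
            simp [Ne.symm hkT, pvAlive, hotarget]
          · simp only [Function.comp_apply, beq_iff_eq, hj, if_false]
            by_cases hjk : j = k
            · subst hjk
              simp [pvAlive, howner, hkP]
            · simp [pvAlive, hjk]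
        rw [List.filter_congr hfeq]
        apply List.map_congr_left
        intro j hj
        by_cases hjt : j = target
        · subst hjt; simp [hWt]
        · simp only [Function.comp_apply, beq_iff_eq, hjt, if_false]
          rw [hWj j hjt]

theorem pv_main (d ow : PySem.Dict String (List String))
    (hnd : d.keys.Nodup)
    (hOW : ∀ t, ow.getD t [] = d.keys.filter (fun c => pvOwns c t)) :
    ∀ (R P : List String) (nc : PySem.Dict String (List String)),
    d.keys = P ++ R →
    nc.items = (d.keys.filter (pvAlive d.keys P)).map (fun j => (j, pvVal d d.keys P j)) →
    (R.foldl (fun nc canonical =>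
      if (PySem.Str.split₀ canonical).length ≠ 1 then nc
      else
        let sig_tokens := pvSigTokens canonical
        if sig_tokens.length ≠ 1 then nc
        else
          let token := sig_tokens.headD ""
          let ownersL := ow.getD token []
          if ownersL.length ≠ 1 then nc
          else
            let target := ownersL.headD ""
            if !(nc.contains target) || !(nc.contains canonical) then nc
            else
              ((nc.getD canonical []).foldl (fun nc al =>
                  let tl := nc.getD target []
                  if tl.contains al then nc else nc.insert target (tl ++ [al])) nc).erase canonical) nc).items
      = (d.keys.filter (pvAlive d.keys (P ++ R))).map (fun j => (j, pvVal d d.keys (P ++ R) j)) := by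
  intro R
  induction R with
  | nil => intro P nc hkeys hitems; simpa using hitems
  | cons k R' ih =>
    intro P nc hkeys hitems
    simp only [List.foldl_cons]
    rw [show P ++ k :: R' = (P ++ [k]) ++ R' by simp]
    apply ih (P ++ [k]) _ (by simpa using hkeys)
    have hkmem : k ∈ d.keys := by rw [hkeys]; simp
    have hkP : k ∉ P := by
      have h0 := hnd; rw [hkeys] at h0
      have h2 := (List.nodup_append.mp h0).2.2
      intro hin; exact h2 k hin k (by simp) rfl
    exact pv_step d ow hnd hOW P k nc hkmem hkP hitems

theorem pv_uniq_inner (toks : List String) (hnd : toks.Nodup)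
    (u : PySem.Dict String (Option String)) (c t : String) :
    ((toks.foldl (fun u t => u.insert t (if u.contains t then none else some c)) u).get? t
      = if t ∈ toks then some (if u.contains t then none else some c) else u.get? t)
    ∧ ((toks.foldl (fun u t => u.insert t (if u.contains t then none else some c)) u).contains t
      = (decide (t ∈ toks) || u.contains t)) := by
  induction toks generalizing u with
  | nil => simp
  | cons x xs ih =>
    simp only [List.foldl_cons]
    by_cases hx : t = x
    · subst hx
      have hnx : t ∉ xs := by simpa using (List.nodup_cons.mp hnd).1
      obtain ⟨ihg, ihc⟩ := ih hnd.of_cons (u.insert t (if u.contains t then none else some c))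
      constructor
      · rw [ihg]
        simp [hnx, PySem.Dict.get?_insert_self]
      · rw [ihc]
        simp [PySem.Dict.contains_insert]
    · obtain ⟨ihg, ihc⟩ := ih hnd.of_cons (u.insert x (if u.contains x then none else some c))
      have hg : (u.insert x (if u.contains x then none else some c)).get? t = u.get? t :=
        PySem.Dict.get?_insert_of_ne _ _ (hne := hx)
      have hc : (u.insert x (if u.contains x then none else some c)).contains t = u.contains t := by
        rw [PySem.Dict.contains_insert]
        simp [hx]
      constructor
      · rw [ihg, hg, hc]
        simp [hx]
      · rw [ihc, hc]
        simp [hx]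

theorem pv_uniq_fold (l : List String) (u : PySem.Dict String (Option String)) (t : String) :
    ((l.foldl (fun u c =>
        if (PySem.Str.split₀ c).length > 1 then
          let sig := pvSigTokens c
          if sig.length ≤ 2 then
            sig.foldl (fun u t => u.insert t (if u.contains t then none else some c)) u
          else u
        else u) u).get? t
      = (if (l.filter (fun c => pvOwns c t)).length = 0 then u.get? t
         else if u.contains t then some none
         else if (l.filter (fun c => pvOwns c t)).length = 1 then
           some (some ((l.filter (fun c => pvOwns c t)).headD ""))
         else some none))
    ∧ ((l.foldl (fun u c =>
        if (PySem.Str.split₀ c).length > 1 then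
          let sig := pvSigTokens c
          if sig.length ≤ 2 then
            sig.foldl (fun u t => u.insert t (if u.contains t then none else some c)) u
          else u
        else u) u).contains t
      = (u.contains t || decide ((l.filter (fun c => pvOwns c t)).length ≠ 0))) := by
  induction l generalizing u with
  | nil => simp
  | cons c cs ih =>
    simp only [List.foldl_cons, List.filter_cons]
    by_cases h1 : (PySem.Str.split₀ c).length > 1
    · by_cases h2 : (pvSigTokens c).length ≤ 2
      · have hnds : (pvSigTokens c).Nodup := by
          unfold pvSigTokens; exact PySem.Set.nodup_ofList _
        obtain ⟨hig, hic⟩ := pv_uniq_inner (pvSigTokens c) hnds u c t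
        by_cases hm : t ∈ pvSigTokens c
        · have howns : pvOwns c t = true := by
            simp only [pvOwns]; rw [if_neg (by omega)]
            simp only [Bool.and_eq_true, decide_eq_true_eq]
            exact ⟨by omega, by simpa using hm⟩
          rw [if_pos h1]
          simp only [if_pos h2, howns, if_pos]
          obtain ⟨ihg, ihc⟩ := ih ((pvSigTokens c).foldl
            (fun u t => u.insert t (if u.contains t then none else some c)) u)
          rw [hig, hic] at ihg
          rw [hic] at ihc
          simp only [hm, if_pos, decide_true, Bool.true_or] at ihg ihc
          constructor
          · rw [ihg]
            by_cases hcs : (cs.filter (fun c => pvOwns c t)).length = 0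
            · have hnil : cs.filter (fun c => pvOwns c t) = [] := List.length_eq_zero_iff.mp hcs
              simp [hcs, hnil]
              by_cases hut : u.contains t = true
              · simp [hut]
              · simp [hut]
            · have hne1 : ¬((cs.filter (fun c => pvOwns c t)).length + 1 = 1) := by omega
              simp only [hcs, if_false, List.length_cons]
              by_cases hut : u.contains t = true
              · simp [hut]
              · simp [hut, hne1]
                have hnil : cs.filter (fun c => pvOwns c t) ≠ [] := by
                  intro h; exact hcs (by simp [h])
                obtain ⟨x, hx⟩ := List.exists_mem_of_ne_nil _ hnil
                exact ⟨x, (List.mem_filter.mp hx).1, by simpa using (List.mem_filter.mp hx).2⟩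
          · rw [ihc]
            simp
        · have howns : pvOwns c t = false := by
            simp only [pvOwns]; rw [if_neg (by omega)]
            simp only [Bool.and_eq_false_iff]
            right; simpa [List.contains_iff_mem] using hm
          rw [if_pos h1]
          simp only [if_pos h2, howns, Bool.false_eq_true, if_false]
          obtain ⟨ihg, ihc⟩ := ih ((pvSigTokens c).foldl
            (fun u t => u.insert t (if u.contains t then none else some c)) u)
          rw [hig, hic] at ihg
          rw [hic] at ihc
          simp only [hm, if_false, decide_false, Bool.false_or] at ihg ihc
          exact ⟨ihg, ihc⟩
      · have howns : pvOwns c t = false := by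
          simp only [pvOwns]; rw [if_neg (by omega)]
          simp only [Bool.and_eq_false_iff, decide_eq_false_iff_not]
          left; omega
        rw [if_pos h1]
        simp only [if_neg h2, howns, Bool.false_eq_true, if_false]
        exact ih u
    · have howns : pvOwns c t = false := by
        simp only [pvOwns]; rw [if_pos (by omega)]
      rw [if_neg h1]
      simp only [howns, Bool.false_eq_true, if_false]
      exact ih u

theorem pv_uniq_getD (keys : List String) (t : String) :
    ((keys.foldl (fun u c =>
        if (PySem.Str.split₀ c).length > 1 then
          let sig := pvSigTokens c
          if sig.length ≤ 2 then
            sig.foldl (fun u t => u.insert t (if u.contains t then none else some c)) u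
          else u
        else u) PySem.Dict.empty).getD t none)
      = (if (keys.filter (fun c => pvOwns c t)).length = 1 then
           some ((keys.filter (fun c => pvOwns c t)).headD "") else none) := by
  obtain ⟨hg, _⟩ := pv_uniq_fold keys PySem.Dict.empty t
  rw [PySem.Dict.getD_eq_get?_getD, hg]
  by_cases h0 : (keys.filter (fun c => pvOwns c t)).length = 0
  · simp [h0]
  · by_cases h1 : (keys.filter (fun c => pvOwns c t)).length = 1
    · simp [h0, h1]
    · simp [h0, h1]

theorem pv_ownerU_eq (keys : List String) (s : String) :
    pvOwnerOfU (keys.foldl (fun u c =>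
        if (PySem.Str.split₀ c).length > 1 then
          let sig := pvSigTokens c
          if sig.length ≤ 2 then
            sig.foldl (fun u t => u.insert t (if u.contains t then none else some c)) u
          else u
        else u) PySem.Dict.empty) s = pvOwnerOf keys s := by
  unfold pvOwnerOfU pvOwnerOf
  by_cases h1 : (PySem.Str.split₀ s).length ≠ 1
  · simp [h1]
  · by_cases h2 : (pvSigTokens s).length ≠ 1
    · simp [h1, h2]
    · simp only [h1, h2, if_false]
      exact pv_uniq_getD keys ((pvSigTokens s).headD "")

theorem pv_groups_fold (f : String → Option String) (l : List String)
    (g : PySem.Dict String (List String)) (k : String) :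
    (l.foldl (fun g s =>
        match f s with
        | some t => g.modify t [] (· ++ [s])
        | none => g) g).getD k []
      = g.getD k [] ++ l.filter (fun s => f s == some k) := by
  induction l generalizing g with
  | nil => simp
  | cons s ss ih =>
    simp only [List.foldl_cons, List.filter_cons]
    cases hf : f s with
    | none => simp only [hf]; rw [ih]; simp
    | some t =>
      simp only [hf]
      rw [ih, PySem.Dict.getD_modify]
      by_cases hk : k = t
      · subst hk
        simp
      · have : (some t == some k) = false := by simpa using Ne.symm hk
        simp [hk, this]

-- the memoised owner dict looks up to the owner predicate
theorem pv_owner_lookup (keys : List String) (hnd : keys.Nodup) (f : String → Option String)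
    (k : String) (hk : k ∈ keys) :
    (keys.foldl (fun ownr k => ownr.insert k (f k)) PySem.Dict.empty).getD k none = f k := by
  have hitems := PySem.Dict.items_foldl_insert_fresh keys (fun a => a) (fun a => f a)
      PySem.Dict.empty (fun a _ => PySem.Dict.contains_empty a) (by simpa using hnd)
  have hmem : (k, f k)
      ∈ (keys.foldl (fun ownr k => ownr.insert k (f k)) PySem.Dict.empty).items := by
    rw [hitems]; simp [hk]
  have hndk : (keys.foldl (fun ownr k => ownr.insert k (f k)) PySem.Dict.empty).keys.Nodup := by
    have hk0 : (keys.foldl (fun ownr k => ownr.insert k (f k)) PySem.Dict.empty).keys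
        = (keys.foldl (fun ownr k => ownr.insert k (f k)) PySem.Dict.empty).items.map (·.1) := rfl
    rw [hk0, hitems]
    simpa [List.map_map, Function.comp_def] using hnd
  exact PySem.Dict.getD_of_get?_eq_some _ _ (PySem.Dict.get?_of_mem_items _ hmem hndk)

-- B's accumulation loop, with its exact loop body
theorem pv_b_items (d : PySem.Dict String (List String)) (keys : List String) (hnd : keys.Nodup)
    (owner : PySem.Dict String (Option String))
    (hlk : ∀ k ∈ keys, owner.getD k none = pvOwnerOf keys k)
    (groups : PySem.Dict String (List String))
    (hgrp : ∀ k, groups.getD k [] = keys.filter (fun s => owner.getD s none == some k)) :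
    (keys.foldl (fun result k =>
      if (owner.getD k none).isSome then result
      else
        let merged := (groups.getD k []).foldl (fun merged s =>
            (d.getD s []).foldl (fun m a => if m.contains a then m else m ++ [a]) merged) (d.getD k [])
        result.insert k merged) PySem.Dict.empty).items
    = (keys.filter (fun k => !(pvOwnerOf keys k).isSome)).map (fun k => (k, pvVal d keys keys k)) := by
  have h := pv_b_fold keys PySem.Dict.empty
      (fun k => (owner.getD k none).isSome)
      (fun k => (groups.getD k []).foldl (fun merged s =>
            (d.getD s []).foldl (fun m a => if m.contains a then m else m ++ [a]) merged) (d.getD k []))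
      hnd (fun k _ => PySem.Dict.contains_empty k)
  refine h.trans ?_
  rw [show PySem.Dict.empty.items = ([] : List (String × List String)) from rfl, List.nil_append]
  have hflt : keys.filter (fun k => !(owner.getD k none).isSome)
      = keys.filter (fun k => !(pvOwnerOf keys k).isSome) :=
    List.filter_congr (fun j hj => by rw [hlk j hj])
  rw [hflt]
  apply List.map_congr_left
  intro j hj
  have hfeq : keys.filter (fun s => owner.getD s none == some j)
      = keys.filter (fun s => pvOwnerOf keys s == some j) :=
    List.filter_congr (fun s hs => by rw [hlk s hs])
  congr 1
  simp only [hgrp j, hfeq]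
  rfl

-- ===== VERDICT (by name: the statement is the Claim_ definition above) =====
set_option maxHeartbeats 1000000 in
theorem claim_single_word_clusters_spec : Claim_equal_claim_single_word_clusters := by
  intro clusters _
  unfold Spec_claim_single_word_clusters claim_single_word_clusters claim_single_word_clusters_alt
  have hnd := PySem.Dict.nodup_keys_ofList clusters
  set d := PySem.Dict.ofList clusters with hd
  have hOW : ∀ t, (d.keys.foldl (fun ow canonical =>
      if (PySem.Str.split₀ canonical).length > 1 then
        let sig_tokens := pvSigTokens canonical
        if sig_tokens.length > 2 then ow
        else sig_tokens.foldl (fun ow token => ow.modify token [] (· ++ [canonical])) ow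
      else ow) PySem.Dict.empty).getD t [] = d.keys.filter (fun c => pvOwns c t) := by
    intro t
    rw [pv_index_eq_scan]
    simp
  have hinit : d.items = (d.keys.filter (pvAlive d.keys [])).map
      (fun j => (j, pvVal d d.keys [] j)) := by
    have h1 : d.keys.filter (pvAlive d.keys []) = d.keys := by
      apply List.filter_eq_self.mpr
      intro j _; simp [pvAlive]
    rw [h1]
    have h2 : ∀ j, pvVal d d.keys [] j = d.getD j [] := by intro j; simp [pvVal]
    simp only [h2]
    exact PySem.Dict.items_eq_map_keys d hnd []
  have hA := pv_main d _ hnd hOW d.keys [] d (by simp) hinit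
  have hlk : ∀ k ∈ d.keys, (d.keys.foldl (fun ownr k => ownr.insert k
        (pvOwnerOfU (d.keys.foldl (fun u c =>
          if (PySem.Str.split₀ c).length > 1 then
            let sig := pvSigTokens c
            if sig.length ≤ 2 then
              sig.foldl (fun u t => u.insert t (if u.contains t then none else some c)) u
            else u
          else u) PySem.Dict.empty) k)) PySem.Dict.empty).getD k none = pvOwnerOf d.keys k := by
    intro k hk
    rw [pv_owner_lookup d.keys hnd _ k hk, pv_ownerU_eq]
  have hgrp : ∀ k, (d.keys.foldl (fun g s =>
      match (d.keys.foldl (fun ownr k => ownr.insert k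
        (pvOwnerOfU (d.keys.foldl (fun u c =>
          if (PySem.Str.split₀ c).length > 1 then
            let sig := pvSigTokens c
            if sig.length ≤ 2 then
              sig.foldl (fun u t => u.insert t (if u.contains t then none else some c)) u
            else u
          else u) PySem.Dict.empty) k)) PySem.Dict.empty).getD s none with
      | some t => g.modify t [] (· ++ [s])
      | none => g) PySem.Dict.empty).getD k []
      = d.keys.filter (fun s => (d.keys.foldl (fun ownr k => ownr.insert k
        (pvOwnerOfU (d.keys.foldl (fun u c =>
          if (PySem.Str.split₀ c).length > 1 then
            let sig := pvSigTokens c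
            if sig.length ≤ 2 then
              sig.foldl (fun u t => u.insert t (if u.contains t then none else some c)) u
            else u
          else u) PySem.Dict.empty) k)) PySem.Dict.empty).getD s none == some k) := by
    intro k
    exact (pv_groups_fold (fun s => (d.keys.foldl (fun ownr k => ownr.insert k
        (pvOwnerOfU (d.keys.foldl (fun u c =>
          if (PySem.Str.split₀ c).length > 1 then
            let sig := pvSigTokens c
            if sig.length ≤ 2 then
              sig.foldl (fun u t => u.insert t (if u.contains t then none else some c)) u
            else u
          else u) PySem.Dict.empty) k)) PySem.Dict.empty).getD s none)
      d.keys PySem.Dict.empty k).trans (by rw [PySem.Dict.getD_empty, List.nil_append])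
  rw [hA, pv_b_items d d.keys hnd _ hlk _ hgrp]
  have hfilter : ∀ j ∈ d.keys, pvAlive d.keys ([] ++ d.keys) j = !(pvOwnerOf d.keys j).isSome := by
    intro j hj
    simp [pvAlive, hj]
  rw [List.filter_congr hfilter]
  apply List.map_congr_left
  intro j _
  simp
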